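-- pv_equiv track=rewrite | github.com/Kumudini-Bachala/cerebrovascular-prediction | app.py | format_llm_response_to_html
-- ===== SOURCE A (Python) =====
-- def format_llm_response_to_html(text):
--     """
--     Converts a simple text format (headings with colons, lists with hyphens)
--     into clean, semantic HTML.
--     """
--     # Handles both actual newlines and escaped '\n' from the LLM
--     lines = text.replace('\\n', '\n').split('\n')
--     html_lines = []
--     in_list = False # Flag to track if we are inside a <ul> tag
--
--     for line in lines:
--         line = line.strip()
--         if not line:
--             continue
--
--         # Check if the line is a heading (e.g., "Smoking:")
--         if line.endswith(':'):
--             if in_list: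
--                 html_lines.append('</ul>') # Close list before a new heading
--                 in_list = False
--             # Use <h4> for a bold, semantic heading
--             html_lines.append(f'<h4>{line}</h4>')
--
--         # Check if the line is a list item (e.g., "- Quit smoking entirely.")
--         elif line.startswith('-'):
--             if not in_list:
--                 html_lines.append('<ul>') # Start a new list
--                 in_list = True
--             # Add the list item, removing the leading '- '
--             html_lines.append(f'<li>{line[1:].strip()}</li>')
--
--         # Otherwise, treat it as a standard paragraph
--         else:
--             if in_list:
--                 html_lines.append('</ul>') # Close list before a paragraph
--                 in_list = False
--             html_lines.append(f'<p>{line}</p>')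
--
--     # After the loop, close any list that might still be open
--     if in_list:
--         html_lines.append('</ul>')
--
--     return "".join(html_lines)
-- ===== SOURCE B (Python) =====
-- def _pv_classify(line):
--     if line.endswith(':'):
--         return ('h', line)
--     if line.startswith('-'):
--         return ('li', line[1:].strip())
--     return ('p', line)
--
-- def _pv_emit(tagged):
--     parts = []
--     rest = tagged
--     while rest:
--         tag, content = rest[0]
--         if tag == 'li':
--             run = []
--             while rest and rest[0][0] == 'li':
--                 run.append(rest[0][1])
--                 rest = rest[1:]
--             parts.append('<ul>' + ''.join('<li>' + c + '</li>' for c in run) + '</ul>')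
--         elif tag == 'h':
--             parts.append('<h4>' + content + '</h4>')
--             rest = rest[1:]
--         else:
--             parts.append('<p>' + content + '</p>')
--             rest = rest[1:]
--     return parts
--
-- def format_llm_response_to_html(text):
--     lines = text.replace('\\n', '\n').split('\n')
--     stripped = [ln.strip() for ln in lines]
--     tagged = [_pv_classify(s) for s in stripped if s]
--     return ''.join(_pv_emit(tagged))
-- ===== Notes on version B (the rewrite author's own statement) =====
-- stated objective: alternative
-- what changed: A's single pass with an in_list flag and post-loop cleanup is replaced by a two-phase pipeline: classify each stripped non-empty line into a tagged pair (heading, list item, or paragraph), then emit fragments by grouping each run of consecutive list items into one ul block, so no open-list state is carried.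
import Mathlib
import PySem

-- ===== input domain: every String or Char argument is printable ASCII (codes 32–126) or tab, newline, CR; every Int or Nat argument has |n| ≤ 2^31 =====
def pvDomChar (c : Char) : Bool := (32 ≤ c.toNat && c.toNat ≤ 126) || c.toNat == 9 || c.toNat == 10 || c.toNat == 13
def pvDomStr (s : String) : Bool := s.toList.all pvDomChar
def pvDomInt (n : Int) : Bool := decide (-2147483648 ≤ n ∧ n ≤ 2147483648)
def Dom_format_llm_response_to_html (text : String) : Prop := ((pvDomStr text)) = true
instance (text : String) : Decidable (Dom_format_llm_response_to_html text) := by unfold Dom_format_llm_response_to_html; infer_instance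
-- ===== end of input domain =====

-- B replaces A's single pass with a stateful in_list flag by a two-phase decomposition
-- (classify every line into a tagged pair, then emit whole <ul> runs at once); objective: alternative.

-- ===== PORT A =====
-- one iteration of A's for-loop: state = (html_lines, in_list)
def pvStepA (st : List (List Char) × Bool) (raw : List Char) : List (List Char) × Bool :=
  let line := PySem.Chars.strip raw
  if line = [] then st
  else if PySem.Chars.endswith line [':'] then
    let acc := if st.2 then st.1 ++ ["</ul>".toList] else st.1
    (acc ++ ["<h4>".toList ++ line ++ "</h4>".toList], false)
  else if PySem.Chars.startswith line ['-'] then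
    let acc := if st.2 then st.1 else st.1 ++ ["<ul>".toList]
    (acc ++ ["<li>".toList ++ PySem.Chars.strip (PySem.Chars.slice line (some 1) none) ++ "</li>".toList], true)
  else
    let acc := if st.2 then st.1 ++ ["</ul>".toList] else st.1
    (acc ++ ["<p>".toList ++ line ++ "</p>".toList], false)

def format_llm_response_to_html (text : String) : String :=
  let lines := PySem.Chars.splitOn (PySem.Chars.replace text.toList ['\\', 'n'] ['\n']) ['\n']
  let st := lines.foldl pvStepA ([], false)
  let html := if st.2 then st.1 ++ ["</ul>".toList] else st.1
  String.ofList (PySem.Chars.join [] html)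

-- ===== PORT B =====
inductive PvTag | h | li | p
deriving DecidableEq, Repr

-- phase one: tag one stripped, non-empty line
def pvClassify1 (line : List Char) : PvTag × List Char :=
  if PySem.Chars.endswith line [':'] then (PvTag.h, line)
  else if PySem.Chars.startswith line ['-'] then
    (PvTag.li, PySem.Chars.strip (PySem.Chars.slice line (some 1) none))
  else (PvTag.p, line)

def pvIsLi (x : PvTag × List Char) : Bool := x.1 == PvTag.li

def pvLiFrag (c : List Char) : List Char := "<li>".toList ++ c ++ "</li>".toList

-- phase two: emit one fragment per tag run, a whole <ul>…</ul> at once for an li run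
def pvEmit : List (PvTag × List Char) → List (List Char)
  | [] => []
  | (t, c) :: rest =>
    match t with
    | PvTag.li =>
        ("<ul>".toList ++ ((c :: (rest.takeWhile pvIsLi).map (·.2)).map pvLiFrag).flatten
           ++ "</ul>".toList) :: pvEmit (rest.dropWhile pvIsLi)
    | PvTag.h => ("<h4>".toList ++ c ++ "</h4>".toList) :: pvEmit rest
    | PvTag.p => ("<p>".toList ++ c ++ "</p>".toList) :: pvEmit rest
termination_by tg => tg.length
decreasing_by
  all_goals simp
  have := List.length_dropWhile_le pvIsLi rest; omega

def format_llm_response_to_html_alt (text : String) : String :=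
  let lines := PySem.Chars.splitOn (PySem.Chars.replace text.toList ['\\', 'n'] ['\n']) ['\n']
  let stripped := lines.map PySem.Chars.strip
  let tagged := (stripped.filter (· ≠ [])).map pvClassify1
  String.ofList (PySem.Chars.join [] (pvEmit tagged))

-- ===== PRECONDITION & SPEC =====
def Spec_format_llm_response_to_html (text : String) (out : String) : Prop := out = format_llm_response_to_html_alt text
instance (text : String) (out : String) : Decidable (Spec_format_llm_response_to_html text out) := by unfold Spec_format_llm_response_to_html; infer_instance

-- ===== CLAIM (what is proved, stated in full; the proofs are below) =====
def Claim_equal_format_llm_response_to_html : Prop := ∀ (text : String), Dom_format_llm_response_to_html text → Spec_format_llm_response_to_html text (format_llm_response_to_html text)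

-- ===== LEMMAS AND PROOFS =====

theorem pv_join_nil_flatten (parts : List (List Char)) :
    PySem.Chars.join [] parts = parts.flatten := by
  induction parts with
  | nil => rfl
  | cons a t ih =>
    cases t with
    | nil => simp [PySem.Chars.join, List.intercalate]
    | cons b u =>
      simp only [PySem.Chars.join, List.intercalate] at *
      simp_all [List.intersperse]

-- the flat (already-joined) text A produces from a classified tail, given the in_list flag
def pvFA : List (PvTag × List Char) → Bool → List Char
  | [], inl => if inl then "</ul>".toList else []
  | (PvTag.h, c) :: r, inl =>
      (if inl then "</ul>".toList else []) ++ ("<h4>".toList ++ c ++ "</h4>".toList) ++ pvFA r false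
  | (PvTag.li, c) :: r, inl =>
      (if inl then [] else "<ul>".toList) ++ pvLiFrag c ++ pvFA r true
  | (PvTag.p, c) :: r, inl =>
      (if inl then "</ul>".toList else []) ++ ("<p>".toList ++ c ++ "</p>".toList) ++ pvFA r false

def pvClassifyList (lines : List (List Char)) : List (PvTag × List Char) :=
  ((lines.map PySem.Chars.strip).filter (· ≠ [])).map pvClassify1

-- A's loop plus its post-loop cleanup, flattened, equals pvFA of the classified lines
theorem pvA_flat (lines : List (List Char)) (acc : List (List Char)) (inl : Bool) :
    (if (lines.foldl pvStepA (acc, inl)).2 then (lines.foldl pvStepA (acc, inl)).1 ++ ["</ul>".toList]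
       else (lines.foldl pvStepA (acc, inl)).1).flatten
      = acc.flatten ++ pvFA (pvClassifyList lines) inl := by
  induction lines generalizing acc inl with
  | nil => cases inl <;> simp [pvFA, pvClassifyList]
  | cons raw rest ih =>
    simp only [List.foldl_cons]
    by_cases h0 : PySem.Chars.strip raw = []
    · rw [show pvStepA (acc, inl) raw = (acc, inl) from by simp [pvStepA, h0]]
      rw [ih]
      simp [pvClassifyList, h0]
    · by_cases h1 : PySem.Chars.endswith (PySem.Chars.strip raw) [':'] = true
      · rw [show pvStepA (acc, inl) raw =
            ((if inl then acc ++ ["</ul>".toList] else acc)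
              ++ ["<h4>".toList ++ PySem.Chars.strip raw ++ "</h4>".toList], false) from by
            simp [pvStepA, h0, h1]]
        rw [ih]
        cases inl <;> simp [pvClassifyList, h0, h1, pvClassify1, pvFA]
      · by_cases h2 : PySem.Chars.startswith (PySem.Chars.strip raw) ['-'] = true
        · rw [show pvStepA (acc, inl) raw =
              ((if inl then acc else acc ++ ["<ul>".toList])
                ++ ["<li>".toList ++ PySem.Chars.strip (PySem.Chars.slice (PySem.Chars.strip raw) (some 1) none) ++ "</li>".toList], true) from by
              simp [pvStepA, h0, h1, h2]]
          rw [ih]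
          cases inl <;> simp [pvClassifyList, h0, h1, h2, pvClassify1, pvFA, pvLiFrag]
        · rw [show pvStepA (acc, inl) raw =
              ((if inl then acc ++ ["</ul>".toList] else acc)
                ++ ["<p>".toList ++ PySem.Chars.strip raw ++ "</p>".toList], false) from by
              simp [pvStepA, h0, h1, h2]]
          rw [ih]
          cases inl <;> simp [pvClassifyList, h0, h1, h2, pvClassify1, pvFA]

-- B's grouped emission flattens to the same text: flag-down and flag-up statements together
theorem pvB_flat : ∀ (n : Nat) (tg : List (PvTag × List Char)), tg.length ≤ n →
    (pvFA tg false = (pvEmit tg).flatten ∧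
     pvFA tg true = ((tg.takeWhile pvIsLi).map (fun x => pvLiFrag x.2)).flatten
        ++ "</ul>".toList ++ (pvEmit (tg.dropWhile pvIsLi)).flatten) := by
  intro n
  induction n with
  | zero =>
    intro tg h
    have : tg = [] := List.eq_nil_of_length_eq_zero (Nat.le_zero.mp h)
    subst this
    simp [pvFA, pvEmit]
  | succ n ih =>
    intro tg h
    match tg with
    | [] => simp [pvFA, pvEmit]
    | (t, c) :: r =>
      simp only [List.length_cons, Nat.succ_le_succ_iff] at h
      have hr := ih r h
      cases t with
      | h =>
        have he : pvEmit ((PvTag.h, c) :: r) = ("<h4>".toList ++ c ++ "</h4>".toList) :: pvEmit r := by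
          rw [pvEmit]
        refine ⟨?_, ?_⟩ <;> simp [pvFA, he, hr.1, pvIsLi]
      | p =>
        have he : pvEmit ((PvTag.p, c) :: r) = ("<p>".toList ++ c ++ "</p>".toList) :: pvEmit r := by
          rw [pvEmit]
        refine ⟨?_, ?_⟩ <;> simp [pvFA, he, hr.1, pvIsLi]
      | li =>
        have he : pvEmit ((PvTag.li, c) :: r) =
            ("<ul>".toList ++ ((c :: (r.takeWhile pvIsLi).map (·.2)).map pvLiFrag).flatten
              ++ "</ul>".toList) :: pvEmit (r.dropWhile pvIsLi) := by
          rw [pvEmit]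
        refine ⟨?_, ?_⟩ <;> simp [pvFA, he, hr.2, pvIsLi, pvLiFrag, Function.comp_def]

-- ===== VERDICT (by name: the statement is the Claim_ definition above) =====
theorem format_llm_response_to_html_spec : Claim_equal_format_llm_response_to_html := by
  intro text _
  unfold Spec_format_llm_response_to_html format_llm_response_to_html format_llm_response_to_html_alt
  have hA := pvA_flat (PySem.Chars.splitOn (PySem.Chars.replace text.toList ['\\', 'n'] ['\n']) ['\n']) [] false
  have hB := (pvB_flat (pvClassifyList (PySem.Chars.splitOn (PySem.Chars.replace text.toList ['\\', 'n'] ['\n']) ['\n'])).length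
      (pvClassifyList (PySem.Chars.splitOn (PySem.Chars.replace text.toList ['\\', 'n'] ['\n']) ['\n'])) le_rfl).1
  simp only [pv_join_nil_flatten]
  rw [hA, hB]
  rfl
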